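-- pv_equiv track=rewrite | github.com/AntonioBritoJunior/ProcesDigitImgs | trabfinal.py | getTranslation
-- ===== SOURCE A (Python) =====
-- def getWeight(position):
--   # retorna o peso do valor da barra wide, de acordo com as regras do
--   # interleaved 2 of 5
--   if position == 0: return 1
--   if position == 1: return 2
--   if position == 2: return 4
--   if position == 3: return 7
--   if position == 4: return 0
--
-- def getTranslation(barNW):
--   # 5 barras pretas (?) == 1 numero
--   # 1	2	4	7	0 --> peso delas, soma == numero, se der 11, vale 0
--   # start = nnnn (barra, espaco, barra, espaco)
--   translation = []
--   blck5 = []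
--   whte5 = []
--
--   for i in range(4, len(barNW)):
--     if barNW[i] > 0: blck5.append(barNW[i])
--     else: whte5.append(barNW[i])
--
--     if len(blck5) == 5:
--       # podemos traduzir esse bloco
--       aux = 0
--       for j in range(5):
--         if blck5[j] == 2:
--           aux += getWeight(j)
--       if aux == 11: aux = 0
--       translation.append(aux)
--       blck5 = []
--     if len(whte5) == 5:
--       # podemos traduzir esse bloco
--       aux = 0
--       for j in range(5):
--         if whte5[j] == -2:
--           aux += getWeight(j)
--       if aux == 11: aux = 0
--       translation.append(aux)
--       whte5 = []
--
--   return translation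
-- ===== SOURCE B (Python) =====
-- def getTranslation(barNW):
--   # Fused single pass: four scalar accumulators instead of the two buffer
--   # lists plus inner reduction loops; same output order and values.
--   weights = (1, 2, 4, 7, 0)
--   translation = []
--   bpos = bsum = wpos = wsum = 0
--   for x in barNW[4:]:
--     if x > 0:
--       if x == 2:
--         bsum += weights[bpos]
--       bpos += 1
--       if bpos == 5:
--         translation.append(0 if bsum == 11 else bsum)
--         bpos = bsum = 0
--     else:
--       if x == -2:
--         wsum += weights[wpos]
--       wpos += 1
--       if wpos == 5:
--         translation.append(0 if wsum == 11 else wsum)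
--         wpos = wsum = 0
--   return translation
-- ===== Notes on version B (the rewrite author's own statement) =====
-- stated objective: simpler
-- what changed: Replaces the two collect-five-then-rescan buffer lists (and their inner weighted-sum loops) with four scalar accumulators updated in one fused pass over barNW[4:].
import Mathlib
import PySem

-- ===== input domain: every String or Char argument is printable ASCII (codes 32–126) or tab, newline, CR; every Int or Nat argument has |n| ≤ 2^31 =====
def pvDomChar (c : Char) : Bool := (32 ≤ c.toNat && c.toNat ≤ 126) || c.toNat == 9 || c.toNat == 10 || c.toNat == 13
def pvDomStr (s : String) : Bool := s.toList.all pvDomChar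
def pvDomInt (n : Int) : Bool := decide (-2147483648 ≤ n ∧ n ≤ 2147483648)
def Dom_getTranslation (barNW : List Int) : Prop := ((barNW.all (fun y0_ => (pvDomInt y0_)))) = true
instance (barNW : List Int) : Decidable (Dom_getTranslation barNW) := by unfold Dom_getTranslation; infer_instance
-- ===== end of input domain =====

-- B fuses A's buffer-lists-then-rescan decomposition into one pass with four scalar accumulators (objective: simpler).

-- ===== PORT A =====
-- getWeight: Python returns None off 0..4; A only calls it with j ∈ range(5), so the final else is unreachable.
def getWeight (position : Int) : Int :=
  if position = 0 then 1
  else if position = 1 then 2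
  else if position = 2 then 4
  else if position = 3 then 7
  else if position = 4 then 0
  else 0

-- stepA: the loop body of A (one iteration), on the current element
def stepA (st : List Int × List Int × List Int) (x : Int) : List Int × List Int × List Int :=
  let tr := st.1
  let b5 := if x > 0 then st.2.1 ++ [x] else st.2.1
  let w5 := if x > 0 then st.2.2 else st.2.2 ++ [x]
  let p1 : List Int × List Int :=
    if b5.length = 5 then
      let aux := (PySem.List.pyRange 0 5 1).foldl
        (fun aux j => if PySem.List.pyGetD b5 j 0 = 2 then aux + getWeight j else aux) 0
      let aux := if aux = 11 then 0 else aux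
      (tr ++ [aux], [])
    else (tr, b5)
  let p2 : List Int × List Int :=
    if w5.length = 5 then
      let aux := (PySem.List.pyRange 0 5 1).foldl
        (fun aux j => if PySem.List.pyGetD w5 j 0 = -2 then aux + getWeight j else aux) 0
      let aux := if aux = 11 then 0 else aux
      (p1.1 ++ [aux], [])
    else (p1.1, w5)
  (p2.1, p1.2, p2.2)

def getTranslation (barNW : List Int) : List Int :=
  ((PySem.List.pyRange 4 (PySem.List.len barNW) 1).foldl
     (fun st i => stepA st (PySem.List.pyGetD barNW i 0)) ([], [], [])).1

-- ===== PORT B =====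
def pvWeights : List Int := [1, 2, 4, 7, 0]

def altLoop : List Int → List Int → Int → Int → Int → Int → List Int
  | [], tr, _, _, _, _ => tr
  | x :: ys, tr, bpos, bsum, wpos, wsum =>
    if x > 0 then
      let bsum := if x = 2 then bsum + PySem.List.pyGetD pvWeights bpos 0 else bsum
      let bpos := bpos + 1
      if bpos = 5 then
        altLoop ys (tr ++ [if bsum = 11 then 0 else bsum]) 0 0 wpos wsum
      else altLoop ys tr bpos bsum wpos wsum
    else
      let wsum := if x = -2 then wsum + PySem.List.pyGetD pvWeights wpos 0 else wsum
      let wpos := wpos + 1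
      if wpos = 5 then
        altLoop ys (tr ++ [if wsum = 11 then 0 else wsum]) bpos bsum 0 0
      else altLoop ys tr bpos bsum wpos wsum

def getTranslation_alt (barNW : List Int) : List Int :=
  altLoop (PySem.List.slice barNW (some 4) none) [] 0 0 0 0

-- ===== PRECONDITION & SPEC =====
def Spec_getTranslation (barNW : List Int) (out : List Int) : Prop := out = getTranslation_alt barNW
instance (barNW : List Int) (out : List Int) : Decidable (Spec_getTranslation barNW out) := by unfold Spec_getTranslation; infer_instance

-- ===== CLAIM (what is proved, stated in full; the proofs are below) =====
def Claim_equal_getTranslation : Prop := ∀ (barNW : List Int), Dom_getTranslation barNW → Spec_getTranslation barNW (getTranslation barNW)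

-- ===== LEMMAS AND PROOFS =====

-- weighted marker sum of a buffer, starting at position p (proof-side characterisation of B's scalar)
def sc (m : Int) : List Int → Int → Int
  | [], _ => 0
  | x :: xs, p => (if x = m then PySem.List.pyGetD pvWeights p 0 else 0) + sc m xs (p + 1)

theorem sc_append (m x : Int) (l : List Int) (p : Int) :
    sc m (l ++ [x]) p = sc m l p + (if x = m then PySem.List.pyGetD pvWeights (p + l.length) 0 else 0) := by
  induction l generalizing p with
  | nil => simp [sc]
  | cons a l ih => simp [sc, ih]; ring_nf

theorem innerA_eq_sc (m : Int) (l : List Int) (hl : l.length = 5) :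
    (PySem.List.pyRange 0 5 1).foldl
      (fun aux j => if PySem.List.pyGetD l j 0 = m then aux + getWeight j else aux) 0
    = sc m l 0 := by
  match l, hl with
  | [a, b, c, d, e], _ =>
    have hr : PySem.List.pyRange 0 5 1 = [0, 1, 2, 3, 4] := by decide
    rw [hr]
    simp only [List.foldl, sc, getWeight, pvWeights, PySem.List.pyGetD, PySem.List.pyGet?,
      PySem.List.pyIdx?, Int.toNat]
    norm_num
    split_ifs <;> omega

theorem loop_eq (ys tr b5 w5 : List Int) (hb : b5.length < 5) (hw : w5.length < 5) :
    (ys.foldl stepA (tr, b5, w5)).1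
    = altLoop ys tr (b5.length : Int) (sc 2 b5 0) (w5.length : Int) (sc (-2) w5 0) := by
  induction ys generalizing tr b5 w5 with
  | nil => simp [altLoop]
  | cons x ys ih =>
    rw [List.foldl_cons]
    by_cases hx : x > 0
    · by_cases h5 : b5.length = 4
      · have hlen : (b5 ++ [x]).length = 5 := by simp [h5]
        have hne : ¬ w5.length = 5 := by omega
        have hstep : stepA (tr, b5, w5) x
            = (tr ++ [if sc 2 (b5 ++ [x]) 0 = 11 then 0 else sc 2 (b5 ++ [x]) 0], [], w5) := by
          simp only [stepA]
          simp [hx, hlen, hne, innerA_eq_sc 2 (b5 ++ [x]) hlen]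
        rw [hstep, ih _ [] w5 (by simp) hw]
        simp only [altLoop]
        have hpos : ((b5.length : Int) + 1 = 5) := by omega
        simp only [hx, if_pos, hpos]
        rw [sc_append]
        norm_num [sc, h5]
        by_cases hx2 : x = 2 <;> simp [hx2]
      · have hlen : ¬ (b5 ++ [x]).length = 5 := by simp; omega
        have hne : ¬ w5.length = 5 := by omega
        have hposn : ¬ ((b5.length : Int) + 1 = 5) := by omega
        have hstep : stepA (tr, b5, w5) x = (tr, b5 ++ [x], w5) := by
          simp only [stepA]
          simp [hx, h5, hne]
        rw [hstep, ih _ (b5 ++ [x]) w5 (by simp; omega) hw]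
        simp only [altLoop]
        simp only [hx, if_pos, hposn, if_false]
        rw [sc_append]
        norm_num
        by_cases hx2 : x = 2 <;> simp [hx2]
    · by_cases h5 : w5.length = 4
      · have hlen : (w5 ++ [x]).length = 5 := by simp [h5]
        have hne : ¬ b5.length = 5 := by omega
        have hstep : stepA (tr, b5, w5) x
            = (tr ++ [if sc (-2) (w5 ++ [x]) 0 = 11 then 0 else sc (-2) (w5 ++ [x]) 0], b5, []) := by
          simp only [stepA]
          simp [hx, hlen, hne, innerA_eq_sc (-2) (w5 ++ [x]) hlen]
        rw [hstep, ih _ b5 [] hb (by simp)]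
        simp only [altLoop]
        have hpos : ((w5.length : Int) + 1 = 5) := by omega
        simp only [hx, if_false, hpos]
        rw [sc_append]
        norm_num [sc, h5]
        by_cases hx2 : x = -2 <;> simp [hx2]
      · have hlen : ¬ (w5 ++ [x]).length = 5 := by simp; omega
        have hne : ¬ b5.length = 5 := by omega
        have hposn : ¬ ((w5.length : Int) + 1 = 5) := by omega
        have hstep : stepA (tr, b5, w5) x = (tr, b5, w5 ++ [x]) := by
          simp only [stepA]
          simp [hx, h5, hne]
        rw [hstep, ih _ b5 (w5 ++ [x]) hb (by simp; omega)]
        simp only [altLoop]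
        simp only [hx, if_false, hposn]
        rw [sc_append]
        norm_num
        by_cases hx2 : x = -2 <;> simp [hx2]

-- ===== VERDICT (by name: the statement is the Claim_ definition above) =====
theorem getTranslation_spec : Claim_equal_getTranslation := by
  intro barNW _
  unfold Spec_getTranslation getTranslation getTranslation_alt
  rw [PySem.List.slice_from _ (by norm_num)]
  rw [PySem.List.foldl_pyRange_pyGetD barNW 0 stepA ([], [], []) (by norm_num)]
  have := loop_eq (barNW.drop (4 : Int).toNat) [] [] [] (by simp) (by simp)
  simpa [sc] using this
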